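-- pv_equiv track=rewrite | github.com/Simacoder/leetcode_test | problem2a.py | solve_maximize_nor
-- ===== SOURCE A (Python) =====
-- def nor(a, b, k):
--     """Compute bitwise NOR of two k-bit integers"""
--     return (~(a | b)) & ((1 << k) - 1)
--
-- def solve_maximize_nor(n, k, arr):
--     result = [0] * n
--
--     # Precompute NOR values for each subarray
--     # nor_values[l][r] will store NOR value of subarray arr[l...r]
--     nor_values = [[0] * n for _ in range(n)]
--
--     # Initialize with single elements
--     for i in range(n):
--         nor_values[i][i] = arr[i]
--
--     # Compute NOR values for all subarrays
--     for length in range(2, n + 1):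
--         for l in range(n - length + 1):
--             r = l + length - 1
--             nor_values[l][r] = nor(nor_values[l][r-1], arr[r], k)
--
--     # Find max NOR for each index
--     for i in range(n):
--         max_nor_value = arr[i]  # Start with single element
--
--         # Check all subarrays containing index i
--         for l in range(i + 1):
--             for r in range(i, n):
--                 max_nor_value = max(max_nor_value, nor_values[l][r])
--
--         result[i] = max_nor_value
--
--     return result
-- ===== SOURCE B (Python) =====
-- def nor(a, b, k):
--     """Compute bitwise NOR of two k-bit integers"""
--     return (~(a | b)) & ((1 << k) - 1)
--
--
-- def solve_maximize_nor(n, k, arr):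
--     # For each start l: build the row of prefix NORs g(l,r) = NOR of arr[l..r],
--     # turn it into suffix maxima (best subarray starting at l and covering index i),
--     # and merge the rows with a running elementwise max over l <= i.  O(n^2).
--     if n <= 0:
--         return []
--     res = []
--     for l in range(n):
--         nors = [arr[l]]
--         for r in range(l + 1, n):
--             nors.append(nor(nors[-1], arr[r], k))
--         suff = suffix_max(nors)
--         if l == 0:
--             res = suff
--         else:
--             res = res[:l] + [max(a, b) for a, b in zip(res[l:], suff)]
--     return res
--
--
-- def suffix_max(xs):
--     """suffix_max(xs)[j] = max(xs[j:]); built back to front."""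
--     out = []
--     for v in reversed(xs):
--         out.append(v if not out or v > out[-1] else out[-1])
--     out.reverse()
--     return out
-- ===== Notes on version B (the rewrite author's own statement) =====
-- stated objective: faster
-- what changed: A precomputes the full NOR table and then, for every index i, rescans all O(n^2) subarrays containing i (O(n^3) total); B builds each start-l row of prefix NORs once, turns it into suffix maxima, and merges the rows with a running elementwise max over starts, so no per-index rescan exists (O(n^2) total).
import Mathlib
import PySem

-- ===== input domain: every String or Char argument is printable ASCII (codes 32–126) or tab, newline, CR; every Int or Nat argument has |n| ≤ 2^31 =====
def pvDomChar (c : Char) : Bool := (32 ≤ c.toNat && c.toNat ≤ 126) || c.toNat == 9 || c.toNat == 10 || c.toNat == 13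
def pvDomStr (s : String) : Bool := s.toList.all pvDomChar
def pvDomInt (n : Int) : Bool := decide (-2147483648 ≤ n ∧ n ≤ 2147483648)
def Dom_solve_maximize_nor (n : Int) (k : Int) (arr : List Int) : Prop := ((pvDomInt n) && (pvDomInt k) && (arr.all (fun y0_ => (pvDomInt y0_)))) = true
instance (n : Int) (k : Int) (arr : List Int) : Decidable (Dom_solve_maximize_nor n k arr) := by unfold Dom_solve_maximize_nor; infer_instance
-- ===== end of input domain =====

-- B replaces A's O(n^3) per-index rescan of the NOR table by per-start rows of suffix
-- maxima merged with a running elementwise max over starts (O(n^2)); objective: faster.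

-- ===== PORT A =====
-- nor(a, b, k): (~(a | b)) & ((1 << k) - 1); both sources define it identically
-- (PySem.Int.band/bor and Int.not are Python-exact; 1 << k with k ≥ 0 is 1 <<< k.toNat)
def pyNor (a b k : Int) : Int :=
  PySem.Int.band (Int.not (PySem.Int.bor a b)) ((1 <<< k.toNat) - 1)

-- nor_values[i][j] read / in-place write; loop indices are ≥ 0 and in range under Pre_
def pvGet2 (m : List (List Int)) (i j : Nat) : Int := (m.getD i []).getD j 0

def pvSet2 (m : List (List Int)) (i j : Nat) (v : Int) : List (List Int) :=
  m.modify i (fun row => row.set j v)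

def solve_maximize_nor (n : Int) (k : Int) (arr : List Int) : List Int :=
  let N := n.toNat                                   -- range(n) = [0, …, N-1]
  let result : List Int := List.replicate N 0        -- result = [0] * n
  let nv0 : List (List Int) := List.replicate N (List.replicate N 0)
  -- for i in range(n): nor_values[i][i] = arr[i]
  let nv1 := (List.range N).foldl (fun m i => pvSet2 m i i (arr.getD i 0)) nv0
  -- for length in range(2, n+1): for l in range(n-length+1): r = l+length-1; nor_values[l][r] = nor(nor_values[l][r-1], arr[r], k)
  let nv := (List.range' 2 (N - 1)).foldl (fun m len =>
      (List.range (N - len + 1)).foldl (fun m l =>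
        pvSet2 m l (l + len - 1)
          (pyNor (pvGet2 m l (l + len - 1 - 1)) (arr.getD (l + len - 1) 0) k)) m) nv1
  -- for i in range(n): max_nor_value = arr[i]; for l in range(i+1): for r in range(i, n): …; result[i] = max_nor_value
  (List.range N).foldl (fun res i =>
    res.set i ((List.range (i + 1)).foldl (fun mx l =>
        (List.range' i (N - i)).foldl (fun mx r => max mx (pvGet2 nv l r)) mx)
      (arr.getD i 0))) result

-- ===== PORT B =====
-- suffix_max(xs) from Source B: built back to front over reversed(xs), then reversed
def pvSuffixMax (xs : List Int) : List Int :=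
  (xs.reverse.foldl (fun out v =>
      out ++ [match out.getLast? with
              | none => v
              | some m => if v > m then v else m]) ([] : List Int)).reverse

def solve_maximize_nor_alt (n : Int) (k : Int) (arr : List Int) : List Int :=
  if n ≤ 0 then []
  else
    let N := n.toNat
    (List.range N).foldl (fun res l =>
      -- nors: prefix NORs of the row starting at l
      let nors := (List.range' (l + 1) (N - (l + 1))).foldl
          (fun nors r => nors ++ [pyNor (nors.getLast?.getD 0) (arr.getD r 0) k])
          [arr.getD l 0]
      let suff := pvSuffixMax nors
      if l = 0 then suff
      else res.take l ++ List.zipWith max (res.drop l) suff) []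

-- ===== PRECONDITION & SPEC =====
-- Pre_ excludes exactly the inputs where the Python A raises: 0 < n > len(arr)
-- (IndexError on arr[i]) and n ≥ 2 with k < 0 (ValueError on 1 << k inside nor).
def Pre_solve_maximize_nor (n : Int) (k : Int) (arr : List Int) : Prop :=
  (0 < n → n ≤ (arr.length : Int)) ∧ (2 ≤ n → 0 ≤ k)
instance (n : Int) (k : Int) (arr : List Int) : Decidable (Pre_solve_maximize_nor n k arr) := by
  unfold Pre_solve_maximize_nor; infer_instance

def pvWitness_solve_maximize_nor : Int × Int × List Int := (3, 2, [1, 2, 3])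

def Spec_solve_maximize_nor (n : Int) (k : Int) (arr : List Int) (out : List Int) : Prop := out = solve_maximize_nor_alt n k arr
instance (n : Int) (k : Int) (arr : List Int) (out : List Int) : Decidable (Spec_solve_maximize_nor n k arr out) := by unfold Spec_solve_maximize_nor; infer_instance

-- ===== CLAIM (what is proved, stated in full; the proofs are below) =====
def Claim_equal_solve_maximize_nor : Prop := ∀ (n : Int) (k : Int) (arr : List Int), Dom_solve_maximize_nor n k arr → Pre_solve_maximize_nor n k arr → Spec_solve_maximize_nor n k arr (solve_maximize_nor n k arr)

-- ===== LEMMAS AND PROOFS =====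

-- arr[j] for a loop counter j
def pvA (arr : List Int) (j : Nat) : Int := arr.getD j 0

-- pvG arr k l d = NOR of arr[l..l+d] (the value both programs tabulate)
def pvG (arr : List Int) (k : Int) (l : Nat) : Nat → Int
  | 0 => pvA arr l
  | d + 1 => pyNor (pvG arr k l d) (pvA arr (l + d + 1)) k

def pvShape (N : Nat) (m : List (List Int)) : Prop :=
  m.length = N ∧ ∀ row ∈ m, row.length = N

-- max NOR over subarrays starting at l and covering index i
def pvSM (arr : List Int) (k : Int) (N l i : Nat) : Int :=
  (List.range' (i + 1) (N - (i + 1))).foldl (fun acc r => max acc (pvG arr k l (r - l)))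
    (pvG arr k l (i - l))

-- max of pvSM over starts l < t
def pvBV (arr : List Int) (k : Int) (N t i : Nat) : Int :=
  (List.range' 1 (t - 1)).foldl (fun acc l => max acc (pvSM arr k N l i)) (pvSM arr k N 0 i)


theorem pv_foldl_max_pull {α : Type} (f : α → Int) (a b : Int) (L : List α) :
    L.foldl (fun acc x => max acc (f x)) (max a b) = max a (L.foldl (fun acc x => max acc (f x)) b) := by
  induction L generalizing b with
  | nil => rfl
  | cons x xs ih => simp only [List.foldl_cons]; rw [max_assoc, ih]

theorem pv_le_foldl_max {α : Type} (f : α → Int) (L : List α) (a : Int) :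
    a ≤ L.foldl (fun acc x => max acc (f x)) a := by
  induction L generalizing a with
  | nil => simp
  | cons x xs ih => exact le_trans (le_max_left _ _) (ih _)

theorem pv_mem_le_foldl_max {α : Type} (f : α → Int) (L : List α) (x : α) (hx : x ∈ L) :
    ∀ a : Int, f x ≤ L.foldl (fun acc x => max acc (f x)) a := by
  induction hx with
  | head ys => exact fun a => le_trans (le_max_right _ _) (pv_le_foldl_max _ _ _)
  | tail y hmem ih => exact fun a => ih _

theorem pv_foldl_congr {α β : Type} {f g : β → α → β} {L : List α} (b : β)
    (h : ∀ b' x, x ∈ L → f b' x = g b' x) : L.foldl f b = L.foldl g b := by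
  induction L generalizing b with
  | nil => rfl
  | cons x xs ih =>
    simp only [List.foldl_cons]
    rw [h b x (List.mem_cons_self)]
    exact ih _ fun b' y hy => h b' y (List.mem_cons_of_mem _ hy)

theorem pv_shape_pvSet2 {N : Nat} {m : List (List Int)} (h : pvShape N m) (i j : Nat) (v : Int) :
    pvShape N (pvSet2 m i j v) := by
  obtain ⟨h1, h2⟩ := h
  refine ⟨by simp [pvSet2, h1], ?_⟩
  intro row hrow
  obtain ⟨t, ht, rfl⟩ := List.getElem_of_mem hrow
  simp only [pvSet2] at ht ⊢
  rw [List.getElem_modify]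
  split
  · simp only [List.length_set]
    exact h2 _ (List.getElem_mem _)
  · exact h2 _ (List.getElem_mem _)

theorem pv_pvGet2_pvSet2 (m : List (List Int)) (i j i' j' : Nat) (v : Int)
    (hi : i < m.length) (hj : j < (m.getD i []).length) :
    pvGet2 (pvSet2 m i j v) i' j' = if i = i' ∧ j = j' then v else pvGet2 m i' j' := by
  simp only [pvGet2, pvSet2, List.getD_eq_getElem?_getD, List.getElem?_modify]
  by_cases hii : i = i'
  · subst hii
    cases hm : m[i]? with
    | none => exact absurd (List.getElem?_eq_none_iff.1 hm) (by omega)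
    | some row =>
      simp only [Option.getD_some]
      have hrow : m.getD i [] = row := by simp [List.getD_eq_getElem?_getD, hm]
      rw [hrow] at hj
      by_cases hjj : j = j'
      · subst hjj; simp [hj]
      · simp [hjj, List.getElem?_set_ne (by omega : j ≠ j')]
  · simp [hii]

theorem pv_rowlen {N : Nat} {m : List (List Int)} (h : pvShape N m) {i : Nat} (hi : i < N) :
    (m.getD i []).length = N := by
  obtain ⟨h1, h2⟩ := h
  rw [List.getD_eq_getElem _ _ (by omega)]
  exact h2 _ (List.getElem_mem _)

theorem pv_init_fold (arr : List Int) (N : Nat) :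
    ∀ (t s : Nat) (m : List (List Int)), pvShape N m → s + t ≤ N →
    pvShape N ((List.range' s t).foldl (fun m i => pvSet2 m i i (arr.getD i 0)) m) ∧
    ∀ i j, pvGet2 ((List.range' s t).foldl (fun m i => pvSet2 m i i (arr.getD i 0)) m) i j
      = if i = j ∧ s ≤ i ∧ i < s + t then pvA arr i else pvGet2 m i j := by
  intro t
  induction t with
  | zero => intro s m hm _; exact ⟨hm, by intro i j; simp⟩
  | succ t ih =>
    intro s m hm hst
    rw [List.range'_succ]
    simp only [List.foldl_cons]
    obtain ⟨hsh, hval⟩ := ih (s+1) (pvSet2 m s s (arr.getD s 0))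
      (pv_shape_pvSet2 hm _ _ _) (by omega)
    refine ⟨hsh, ?_⟩
    intro i j
    rw [hval i j, pv_pvGet2_pvSet2 m s s i j _ (by rw [hm.1]; omega)
      (by rw [pv_rowlen hm (by omega)]; omega)]
    split_ifs <;> simp_all [pvA] <;> omega

theorem pv_len_inner (arr : List Int) (k : Int) (N len : Nat) (h2 : 2 ≤ len) (hlN : len ≤ N) :
    ∀ (t s : Nat) (m : List (List Int)), pvShape N m → s + t ≤ N - len + 1 →
    (∀ l r : Nat, l ≤ r → r < N → (r - l + 2 ≤ len ∨ (r - l + 1 = len ∧ l < s)) →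
      pvGet2 m l r = pvG arr k l (r - l)) →
    pvShape N ((List.range' s t).foldl (fun m l => pvSet2 m l (l + len - 1)
        (pyNor (pvGet2 m l (l + len - 1 - 1)) (arr.getD (l + len - 1) 0) k)) m) ∧
    (∀ l r : Nat, l ≤ r → r < N → (r - l + 2 ≤ len ∨ (r - l + 1 = len ∧ l < s + t)) →
      pvGet2 ((List.range' s t).foldl (fun m l => pvSet2 m l (l + len - 1)
        (pyNor (pvGet2 m l (l + len - 1 - 1)) (arr.getD (l + len - 1) 0) k)) m) l r
        = pvG arr k l (r - l)) := by
  intro t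
  induction t with
  | zero =>
    intro s m hm _ hcov
    exact ⟨hm, fun l r h1 h3 h4 => hcov l r h1 h3 (by omega)⟩
  | succ t ih =>
    intro s m hm hst hcov
    rw [List.range'_succ]
    simp only [List.foldl_cons]
    have hframe : ∀ l r : Nat,
        pvGet2 (pvSet2 m s (s + len - 1) (pyNor (pvGet2 m s (s + len - 1 - 1)) (arr.getD (s + len - 1) 0) k)) l r
        = if s = l ∧ s + len - 1 = r then pyNor (pvGet2 m s (s + len - 1 - 1)) (arr.getD (s + len - 1) 0) k
          else pvGet2 m l r := by
      intro l r
      exact pv_pvGet2_pvSet2 m s (s + len - 1) l r _ (by rw [hm.1]; omega)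
        (by rw [pv_rowlen hm (by omega)]; omega)
    have hval : pyNor (pvGet2 m s (s + len - 1 - 1)) (arr.getD (s + len - 1) 0) k
        = pvG arr k s (len - 1) := by
      have hold : pvGet2 m s (s + len - 1 - 1) = pvG arr k s (len - 2) := by
        have := hcov s (s + len - 1 - 1) (by omega) (by omega) (by omega)
        rwa [show s + len - 1 - 1 - s = len - 2 by omega] at this
      rw [hold]
      have : len - 1 = (len - 2) + 1 := by omega
      rw [this, pvG]
      have : s + (len - 2) + 1 = s + len - 1 := by omega
      rw [this, pvA]
    have hcov' : ∀ l r : Nat, l ≤ r → r < N → (r - l + 2 ≤ len ∨ (r - l + 1 = len ∧ l < s + 1)) →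
        pvGet2 (pvSet2 m s (s + len - 1)
          (pyNor (pvGet2 m s (s + len - 1 - 1)) (arr.getD (s + len - 1) 0) k)) l r
        = pvG arr k l (r - l) := by
      intro l r hlr hrN hc
      rw [hframe l r]
      by_cases he : s = l ∧ s + len - 1 = r
      · have hl : l = s := he.1.symm
        have hr : r = s + len - 1 := he.2.symm
        subst hl; subst hr
        rw [if_pos ⟨rfl, rfl⟩, hval]
        congr 1
        omega
      · rw [if_neg he]
        refine hcov l r hlr hrN ?_
        rcases hc with h | h
        · exact Or.inl h
        · refine Or.inr ⟨h.1, ?_⟩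
          rcases Nat.lt_succ_iff_lt_or_eq.1 h.2 with h' | h'
          · exact h'
          · exact absurd ⟨h'.symm, by omega⟩ he
    obtain ⟨hsh, hv⟩ := ih (s+1) _ (pv_shape_pvSet2 hm _ _ _) (by omega) hcov'
    exact ⟨hsh, fun l r h1 h3 h4 => hv l r h1 h3 (by omega)⟩

theorem pv_len_outer (arr : List Int) (k : Int) (N : Nat) :
    ∀ (t L : Nat) (m : List (List Int)), 1 ≤ L → L + t ≤ N → pvShape N m →
    (∀ l r : Nat, l ≤ r → r < N → r - l + 1 ≤ L → pvGet2 m l r = pvG arr k l (r - l)) →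
    ∀ l r : Nat, l ≤ r → r < N → r - l + 1 ≤ L + t →
    pvGet2 ((List.range' (L + 1) t).foldl (fun m len => (List.range' 0 (N - len + 1)).foldl
        (fun m l => pvSet2 m l (l + len - 1)
          (pyNor (pvGet2 m l (l + len - 1 - 1)) (arr.getD (l + len - 1) 0) k)) m) m) l r
      = pvG arr k l (r - l) := by
  intro t
  induction t with
  | zero => intro L m h1 h2 hm hcov l r a b c; exact hcov l r a b (by omega)
  | succ t ih =>
    intro L m hL hLt hm hcov
    rw [List.range'_succ]
    simp only [List.foldl_cons]
    obtain ⟨hsh, hv⟩ := pv_len_inner arr k N (L + 1) (by omega) (by omega)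
      (N - (L + 1) + 1) 0 m hm (by omega)
      (fun l r hlr hrN hc => hcov l r hlr hrN (by omega))
    have hcov' : ∀ l r : Nat, l ≤ r → r < N → r - l + 1 ≤ L + 1 →
        pvGet2 ((List.range' 0 (N - (L + 1) + 1)).foldl (fun m l => pvSet2 m l (l + (L + 1) - 1)
          (pyNor (pvGet2 m l (l + (L + 1) - 1 - 1)) (arr.getD (l + (L + 1) - 1) 0) k)) m) l r
        = pvG arr k l (r - l) := by
      intro l r hlr hrN hc
      exact hv l r hlr hrN (by omega)
    have := ih (L + 1) _ (by omega) (by omega) hsh hcov'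
    intro l r a b c
    exact this l r a b (by omega)

theorem pv_table (arr : List Int) (k : Int) (N : Nat) (l r : Nat) (hlr : l ≤ r) (hrN : r < N) :
    pvGet2 ((List.range' 2 (N - 1)).foldl (fun m len => (List.range' 0 (N - len + 1)).foldl
        (fun m l => pvSet2 m l (l + len - 1)
          (pyNor (pvGet2 m l (l + len - 1 - 1)) (arr.getD (l + len - 1) 0) k)) m)
      ((List.range' 0 N).foldl (fun m i => pvSet2 m i i (arr.getD i 0))
        (List.replicate N (List.replicate N 0)))) l r
      = pvG arr k l (r - l) := by
  have hN : 1 ≤ N := by omega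
  have hshape0 : pvShape N (List.replicate N (List.replicate N (0 : Int))) :=
    ⟨by simp, fun row hrow => by rw [List.eq_of_mem_replicate hrow]; simp⟩
  obtain ⟨hsh1, hv1⟩ := pv_init_fold arr N N 0 _ hshape0 (by omega)
  have hdiag : ∀ i : Nat, i < N →
      pvGet2 ((List.range' 0 N).foldl (fun m i => pvSet2 m i i (arr.getD i 0))
        (List.replicate N (List.replicate N 0))) i i = pvA arr i := by
    intro i hi
    rw [hv1 i i]
    simp [hi]
  have hcov1 : ∀ l r : Nat, l ≤ r → r < N → r - l + 1 ≤ 1 →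
      pvGet2 ((List.range' 0 N).foldl (fun m i => pvSet2 m i i (arr.getD i 0))
        (List.replicate N (List.replicate N 0))) l r = pvG arr k l (r - l) := by
    intro l r hlr' hrN' hc
    have : l = r := by omega
    subst this
    rw [hdiag l hrN']
    simp [pvG]
  have := pv_len_outer arr k N (N - 1) 1 _ (by omega) (by omega) hsh1 hcov1 l r hlr hrN (by omega)
  exact this

theorem pv_foldl_set_map (f : Nat → Int) :
    ∀ (t s : Nat) (res : List Int), res.length = s + t →
    (List.range' s t).foldl (fun res i => res.set i (f i)) res
      = res.take s ++ (List.range' s t).map f := by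
  intro t
  induction t with
  | zero =>
    intro s res h
    simp only [List.range'_zero, List.foldl_nil, List.map_nil, List.append_nil]
    rw [List.take_of_length_le (by omega)]
  | succ t ih =>
    intro s res h
    rw [List.range'_succ]
    simp only [List.foldl_cons, List.map_cons]
    rw [ih (s + 1) _ (by simp [h]; omega)]
    have hset : res.set s (f s) = res.take s ++ f s :: res.drop (s + 1) := by
      rw [List.set_eq_take_append_cons_drop]; simp [h]
    rw [hset]
    rw [List.take_append]
    have h1 : (res.take s).length = s := by simp [h]
    rw [List.take_of_length_le (by omega), h1]
    simp

theorem pv_Afold (arr : List Int) (k : Int) (N i : Nat) (hi : i < N) :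
    (List.range' 0 (i + 1)).foldl (fun mx l =>
        (List.range' i (N - i)).foldl (fun mx r => max mx (pvG arr k l (r - l))) mx)
      (pvA arr i)
      = pvBV arr k N (i + 1) i := by
  rw [← List.range_eq_range']
  have hsplit : List.range' i (N - i) = i :: List.range' (i + 1) (N - (i + 1)) := by
    rw [show N - i = (N - (i + 1)) + 1 by omega, List.range'_succ]
  have hinner : ∀ (l : Nat) (mx : Int),
      (List.range' i (N - i)).foldl (fun mx r => max mx (pvG arr k l (r - l))) mx
        = max mx (pvSM arr k N l i) := by
    intro l mx
    rw [hsplit]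
    simp only [List.foldl_cons]
    rw [pv_foldl_max_pull (fun r => pvG arr k l (r - l)) mx (pvG arr k l (i - l))]
    rfl
  rw [pv_foldl_congr (pvA arr i) (fun mx l _ => hinner l mx)]
  rw [List.range_eq_range', List.range'_succ]
  simp only [List.foldl_cons]
  rw [show (0 : Nat) + 1 = 1 from rfl]
  rw [pv_foldl_max_pull (fun l => pvSM arr k N l i) (pvA arr i) (pvSM arr k N 0 i)]
  have hle : pvA arr i ≤ pvBV arr k N (i + 1) i := by
    have hseed : pvA arr i ≤ pvSM arr k N i i := by
      have : pvG arr k i (i - i) = pvA arr i := by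
        rw [show i - i = 0 by omega]; rfl
      calc pvA arr i = pvG arr k i (i - i) := this.symm
        _ ≤ pvSM arr k N i i := pv_le_foldl_max _ _ _
    rcases Nat.eq_zero_or_pos i with h0 | h0
    · subst h0
      simpa [pvBV] using hseed
    · have hmem : i ∈ List.range' 1 i := List.mem_range'_1.2 ⟨by omega, by omega⟩
      exact le_trans hseed (pv_mem_le_foldl_max (fun l => pvSM arr k N l i) _ i hmem _)
  have : (i + 1) - 1 = i := by omega
  rw [pvBV, this] at hle ⊢
  exact max_eq_right hle

theorem pv_A_eq (n k : Int) (arr : List Int) :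
    solve_maximize_nor n k arr
      = (List.range' 0 n.toNat).map (fun i => pvBV arr k n.toNat (i + 1) i) := by
  unfold solve_maximize_nor
  simp only [List.range_eq_range']
  set N := n.toNat with hN
  rw [pv_foldl_set_map _ N 0 (List.replicate N 0) (by simp)]
  simp only [List.take_zero, List.nil_append]
  apply List.map_congr_left
  intro i hi
  have hiN : i < N := by
    have := List.mem_range'_1.1 hi; omega
  rw [← pv_Afold arr k N i hiN]
  apply pv_foldl_congr
  intro mx l hl
  apply pv_foldl_congr
  intro mx' r hr
  have hl' : l < i + 1 := by have := List.mem_range'_1.1 hl; omega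
  have hr' : i ≤ r ∧ r < i + (N - i) := List.mem_range'_1.1 hr
  rw [pv_table arr k N l r (by omega) (by omega)]

def pvSfx : List Int → List Int
  | [] => []
  | x :: xs =>
    match pvSfx xs with
    | [] => [x]
    | m :: t => max x m :: m :: t

theorem pv_rev_fold (xs : List Int) :
    xs.reverse.foldl (fun out v =>
        out ++ [match out.getLast? with
                | none => v
                | some m => if v > m then v else m]) ([] : List Int)
      = (pvSfx xs).reverse := by
  induction xs with
  | nil => rfl
  | cons x xs ih =>
    rw [List.reverse_cons, List.foldl_append, ih]
    simp only [List.foldl_cons, List.foldl_nil, List.getLast?_reverse]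
    cases h : pvSfx xs with
    | nil => simp [pvSfx, h]
    | cons m t =>
      have hmax : (if x > m then x else m) = max x m := by
        split_ifs with h' <;> omega
      simp only [List.head?_cons, hmax, pvSfx, h]
      simp

theorem pv_suffixMax_eq (xs : List Int) : pvSuffixMax xs = pvSfx xs := by
  rw [pvSuffixMax, pv_rev_fold, List.reverse_reverse]

theorem pv_sfx_length (xs : List Int) : (pvSfx xs).length = xs.length := by
  induction xs with
  | nil => rfl
  | cons x xs ih =>
    cases h : pvSfx xs with
    | nil => simp [pvSfx, h, ← ih]
    | cons m t => simp [pvSfx, h, ← ih]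

theorem pv_sfx_cons (x : Int) (xs : List Int) :
    pvSfx (x :: xs) = match pvSfx xs with
      | [] => [x]
      | m :: t => max x m :: m :: t := rfl

theorem pv_sfx_getD (xs : List Int) : ∀ j, j < xs.length →
    (pvSfx xs).getD j 0 = (xs.drop (j + 1)).foldl (fun acc v => max acc v) (xs.getD j 0) := by
  induction xs with
  | nil => intro j hj; simp at hj
  | cons x xs ih =>
    intro j hj
    cases j with
    | zero =>
      cases h : pvSfx xs with
      | nil =>
        have hx : xs = [] := List.eq_nil_of_length_eq_zero (by rw [← pv_sfx_length, h]; rfl)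
        subst hx
        simp [pvSfx]
      | cons m t =>
        have hxs : xs ≠ [] := by
          intro hh; subst hh; simp [pvSfx] at h
        obtain ⟨y, ys, rfl⟩ := List.exists_cons_of_ne_nil hxs
        have hm : m = (pvSfx (y :: ys)).getD 0 0 := by rw [h]; rfl
        rw [ih 0 (by simp)] at hm
        simp only [List.getD_cons_zero, List.drop_succ_cons, List.drop_zero] at hm
        rw [pv_sfx_cons, h]
        simp only [List.getD_cons_zero, List.drop_succ_cons, List.drop_zero, List.foldl_cons]
        rw [pv_foldl_max_pull (fun v => v) x y ys, hm]
    | succ j =>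
      have hj' : j < xs.length := by simpa using hj
      cases h : pvSfx xs with
      | nil =>
        exfalso
        have := pv_sfx_length xs
        rw [h] at this
        simp at this
        omega
      | cons m t =>
        simp only [pv_sfx_cons, h]
        show (m :: t).getD j 0 = _
        rw [← h, ih j hj']
        rfl

theorem pv_nors (arr : List Int) (k : Int) (l : Nat) : ∀ t : Nat,
    (List.range' (l + 1) t).foldl
        (fun nors r => nors ++ [pyNor (nors.getLast?.getD 0) (arr.getD r 0) k])
        [arr.getD l 0]
      = (List.range' l (t + 1)).map (fun r => pvG arr k l (r - l)) := by
  intro t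
  induction t with
  | zero => simp [pvG, pvA]
  | succ t ih =>
    rw [List.range'_concat, List.foldl_append, ih]
    simp only [List.foldl_cons, List.foldl_nil]
    have hlast : ((List.range' l (t + 1)).map (fun r => pvG arr k l (r - l))).getLast?
        = some (pvG arr k l t) := by
      rw [List.range'_concat, List.map_append]
      simp only [List.map_cons, List.map_nil, List.getLast?_concat]
      congr 2
      omega
    rw [hlast]
    have hnew : pyNor (pvG arr k l t) (arr.getD (l + 1 + 1 * t) 0) k = pvG arr k l (t + 1) := by
      have h1 : l + 1 + 1 * t = l + t + 1 := by omega
      rw [h1, pvG, pvA]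
    simp only [Option.getD_some, hnew]
    rw [show t + 1 + 1 = (t + 1) + 1 from rfl, List.range'_concat (n := t + 1)]
    rw [List.map_append]
    simp only [List.map_cons, List.map_nil]
    congr 3
    omega

theorem pv_suff_getD (arr : List Int) (k : Int) (N l j : Nat) (hj : j < N - l) :
    (pvSfx ((List.range' l (N - l)).map (fun r => pvG arr k l (r - l)))).getD j 0
      = pvSM arr k N l (l + j) := by
  set f := fun r => pvG arr k l (r - l) with hf
  have hlen : ((List.range' l (N - l)).map f).length = N - l := by simp
  rw [pv_sfx_getD _ j (by omega)]
  have hgd : ((List.range' l (N - l)).map f).getD j 0 = pvG arr k l j := by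
    rw [List.getD_eq_getElem _ _ (by omega)]
    rw [List.getElem_map, List.getElem_range']
    simp [hf]
  have hdrop : ((List.range' l (N - l)).map f).drop (j + 1)
      = (List.range' (l + (j + 1)) (N - l - (j + 1))).map f := by
    rw [← List.map_drop, List.drop_range']
    simp
  rw [hgd, hdrop, List.foldl_map]
  have h1 : l + (j + 1) = l + j + 1 := by omega
  have h2 : N - l - (j + 1) = N - (l + j + 1) := by omega
  rw [h1, h2, pvSM, show l + j - l = j by omega]

theorem pv_BV_succ (arr : List Int) (k : Int) (N L i : Nat) (hL : 1 ≤ L) :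
    pvBV arr k N (L + 1) i = max (pvBV arr k N L i) (pvSM arr k N L i) := by
  rw [pvBV, pvBV, show L + 1 - 1 = (L - 1) + 1 by omega, List.range'_concat, List.foldl_append]
  simp only [List.foldl_cons, List.foldl_nil]
  rw [show 1 + 1 * (L - 1) = L by omega]

theorem pv_B_inv (arr : List Int) (k : Int) (N : Nat) (hN : 1 ≤ N) :
    ∀ L : Nat, 1 ≤ L → L ≤ N →
    (List.range' 0 L).foldl (fun res l =>
        let nors := (List.range' (l + 1) (N - (l + 1))).foldl
            (fun nors r => nors ++ [pyNor (nors.getLast?.getD 0) (arr.getD r 0) k])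
            [arr.getD l 0]
        let suff := pvSuffixMax nors
        if l = 0 then suff
        else res.take l ++ List.zipWith max (res.drop l) suff) []
      = (List.range' 0 N).map (fun i => pvBV arr k N (min (i + 1) L) i) := by
  intro L
  induction L with
  | zero => omega
  | succ L ih =>
    intro _ hLN
    rcases Nat.eq_zero_or_pos L with rfl | hL
    · -- first iteration: l = 0
      simp only [Nat.zero_add, List.range'_one, List.foldl_cons, List.foldl_nil,
        if_true]
      have hnors := pv_nors arr k 0 (N - 1)
      simp only [Nat.zero_add] at hnors
      rw [show N - 1 + 1 = N by omega] at hnors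
      rw [hnors, pv_suffixMax_eq]
      apply List.ext_getElem
      · simp [pv_sfx_length]
      · intro i h1 h2
        have hiN : i < N := by simpa [pv_sfx_length] using h1
        have hsuff := pv_suff_getD arr k N 0 i (by omega)
        rw [Nat.sub_zero, Nat.zero_add] at hsuff
        rw [List.getElem_map, List.getElem_range', ← List.getD_eq_getElem _ 0 h1, hsuff]
        rw [show 0 + 1 * i = i by omega, show min (i + 1) 1 = 1 by omega, pvBV,
          List.range'_zero, List.foldl_nil]
    · -- later iteration: l = L ≥ 1
      rw [List.range'_concat, List.foldl_append, ih hL (by omega)]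
      simp only [List.foldl_cons, List.foldl_nil]
      rw [show 0 + 1 * L = L by omega, if_neg (by omega : ¬ L = 0)]
      rw [pv_nors arr k L (N - (L + 1)), show N - (L + 1) + 1 = N - L by omega, pv_suffixMax_eq]
      have hsplitN : List.range' 0 N = List.range' 0 L ++ List.range' L (N - L) := by
        rw [show N = L + (N - L) by omega, ← List.range'_append (s := 0) (m := L) (n := N - L) (step := 1),
          show 0 + 1 * L = L by omega, show L + (N - L) - L = N - L by omega]
      rw [hsplitN, List.map_append, List.map_append]
      rw [List.take_left' (by simp), List.drop_left' (by simp)]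
      congr 1
      · apply List.map_congr_left
        intro i hi
        have : i < L := by have := List.mem_range'_1.1 hi; omega
        rw [show min (i + 1) L = i + 1 by omega, show min (i + 1) (L + 1) = i + 1 by omega]
      · apply List.ext_getElem
        · simp [pv_sfx_length]
        · intro j h1 h2
          have hjNL : j < N - L := by
            simp [pv_sfx_length] at h1
            omega
          rw [List.getElem_zipWith, List.getElem_map, List.getElem_range',
            List.getElem_map, List.getElem_range']
          have hsuff := pv_suff_getD arr k N L j hjNL
          have hlen : (pvSfx ((List.range' L (N - L)).map fun r => pvG arr k L (r - L))).length
              = N - L := by simp [pv_sfx_length]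
          rw [← List.getD_eq_getElem _ 0 (by rw [hlen]; exact hjNL), hsuff]
          rw [show L + 1 * j = L + j by omega]
          rw [show min (L + j + 1) L = L by omega, show min (L + j + 1) (L + 1) = L + 1 by omega]
          exact (pv_BV_succ arr k N L (L + j) hL).symm

theorem pv_B_eq (n k : Int) (arr : List Int) (h : ¬ n ≤ 0) :
    solve_maximize_nor_alt n k arr
      = (List.range' 0 n.toNat).map (fun i => pvBV arr k n.toNat (i + 1) i) := by
  unfold solve_maximize_nor_alt
  rw [if_neg h]
  simp only [List.range_eq_range']
  have hN : 1 ≤ n.toNat := by omega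
  rw [pv_B_inv arr k n.toNat hN n.toNat hN le_rfl]
  apply List.map_congr_left
  intro i hi
  have : i < n.toNat := by have := List.mem_range'_1.1 hi; omega
  rw [show min (i + 1) n.toNat = i + 1 by omega]

theorem pv_final (n k : Int) (arr : List Int) :
    solve_maximize_nor n k arr = solve_maximize_nor_alt n k arr := by
  by_cases h : n ≤ 0
  · have hA := pv_A_eq n k arr
    rw [show n.toNat = 0 by omega] at hA
    simp only [List.range'_zero, List.map_nil] at hA
    rw [hA]
    unfold solve_maximize_nor_alt
    rw [if_pos h]
  · rw [pv_A_eq n k arr, pv_B_eq n k arr h]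

-- ===== VERDICT (by name: the statement is the Claim_ definition above) =====
theorem solve_maximize_nor_spec : Claim_equal_solve_maximize_nor := by
  intro n k arr _ _
  unfold Spec_solve_maximize_nor
  exact pv_final n k arr
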